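-- pv_equiv track=rewrite | github.com/MatthiasEbner2002/game | components/other/UI.py | getArrayWithBorder
-- ===== SOURCE A (Python) =====
-- def getArrayWithBorder(x, y):
--     ret = [[' ' for i in range(y + 1)]
--            for j in range(x + 1)]
--
--     for i in range(0, x):
--         ret[i][0] = '║'
--         ret[i][y - 1] = '║'
--
--     for i in range(0, y - 1):
--         ret[0][i] = '═'
--         ret[x - 1][i] = '═'
--
--     ret[0][y - 1] = '╗'
--     ret[x - 1][y - 1] = '╝'
--     ret[x - 1][0] = '╚'
--     ret[0][0] = '╔'
--
--     return ret
-- ===== SOURCE B (Python) =====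
-- def getArrayWithBorder(x, y):
--     def paint(strokes):
--         row = [' '] * (y + 1)
--         for j, ch in strokes:
--             row[j] = ch
--         return row
--
--     edge = [(j, '═') for j in range(y - 1)]
--     top = paint(edge + [(y - 1, '╗'), (0, '╔')])
--     bottom = paint(edge + [(y - 1, '╝'), (0, '╚')])
--     side = paint([(0, '║'), (y - 1, '║')])
--
--     rows = [side[:] for _ in range(x)] + [paint([])]
--     rows[0] = top
--     rows[x - 1] = bottom
--     return rows
-- ===== Notes on version B (the rewrite author's own statement) =====
-- stated objective: alternative
-- what changed: A allocates a space-filled (x+1)x(y+1) grid and destructively overwrites cells in four global passes (vertical edges, horizontal edges, corners); B paints four template rows (top edge, bottom edge, side, blank) from declarative stroke lists and assembles the grid from copies of them, assigning the top and bottom rows by index.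
-- intended difference: On collapsed heights x < 2 (with x,y >= 0) the top and bottom border rows are the same row: A's interleaved writes there end with the '╔' corner so its merged row reads ╔…╝, while B assigns the top row and then the bottom row so its merged row reads ╚…╝ — an unspecified degenerate corner on which either collapsed value is as defensible as the other. — e.g. on getArrayWithBorder(1, 3): A returns [["╔", "═", "╝", " "], [" ", " ", " ", " "]], B returns [["╚", "═", "╝", " "], [" ", " ", " ", " "]]
import Mathlib
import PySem

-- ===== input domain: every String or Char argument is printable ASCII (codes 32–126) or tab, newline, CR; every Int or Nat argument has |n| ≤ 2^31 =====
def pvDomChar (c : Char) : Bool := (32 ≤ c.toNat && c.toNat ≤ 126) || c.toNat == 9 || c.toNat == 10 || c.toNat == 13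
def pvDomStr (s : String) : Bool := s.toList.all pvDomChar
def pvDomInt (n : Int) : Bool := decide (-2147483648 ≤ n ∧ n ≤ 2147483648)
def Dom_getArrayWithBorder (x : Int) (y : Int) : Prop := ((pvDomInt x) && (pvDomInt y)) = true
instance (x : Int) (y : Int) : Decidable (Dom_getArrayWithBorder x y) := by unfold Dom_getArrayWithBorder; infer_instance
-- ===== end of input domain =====

-- B replaces A's mutate-a-grid-in-four-passes construction by painting four template rows from
-- declarative stroke lists and assembling them; on collapsed heights x < 2 (D_ below) the top
-- and bottom edges land on the same row and B's last assignment wins where A's last write did.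


-- ===== PORT A =====
-- Python `g[i][j] = v`: read row i, set its item j, store the row back.  Exact wherever both
-- indexings are in range (Python-style negative indices included); Python raises IndexError
-- otherwise — those inputs are excluded by Pre_ below (pySetD/pyGetD then leave g unchanged).
def pySet2 (g : List (List String)) (i j : Int) (v : String) : List (List String) :=
  PySem.List.pySetD g i (PySem.List.pySetD (PySem.List.pyGetD g i []) j v)

def getArrayWithBorder (x : Int) (y : Int) : List (List String) :=
  let ret0 := (PySem.List.pyRange 0 (x+1) 1).map
    (fun _ => (PySem.List.pyRange 0 (y+1) 1).map (fun _ => " "))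
  let ret1 := (PySem.List.pyRange 0 x 1).foldl
    (fun r i => pySet2 (pySet2 r i 0 "║") i (y-1) "║") ret0
  let ret2 := (PySem.List.pyRange 0 (y-1) 1).foldl
    (fun r i => pySet2 (pySet2 r 0 i "═") (x-1) i "═") ret1
  let ret3 := pySet2 ret2 0 (y-1) "╗"
  let ret4 := pySet2 ret3 (x-1) (y-1) "╝"
  let ret5 := pySet2 ret4 (x-1) 0 "╚"
  pySet2 ret5 0 0 "╔"

-- ===== PORT B =====
-- Source B's paint: a fresh row of y+1 spaces with each stroke `row[j] = ch` applied in order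
-- (pySetD = Python item assignment, exact where the index is in range; Pre_ excludes the rest).
def paintB (y : Int) (strokes : List (Int × String)) : List String :=
  strokes.foldl (fun row s => PySem.List.pySetD row s.1 s.2) (List.replicate (y+1).toNat " ")

def getArrayWithBorder_alt (x : Int) (y : Int) : List (List String) :=
  let edge := (PySem.List.pyRange 0 (y-1) 1).map (fun j => (j, "═"))
  let top := paintB y (edge ++ [(y-1, "╗"), (0, "╔")])
  let bottom := paintB y (edge ++ [(y-1, "╝"), (0, "╚")])
  let side := paintB y [(0, "║"), (y-1, "║")]
  let rows := List.replicate x.toNat side ++ [paintB y []]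
  let rows1 := PySem.List.pySetD rows 0 top
  PySem.List.pySetD rows1 (x-1) bottom

-- ===== PRECONDITION & SPEC =====
-- A raises IndexError whenever x < 0 (its corner writes index a missing row) or y < 0
-- (rows have no cell the edge writes hit); Pre_ excludes exactly those inputs.
def Pre_getArrayWithBorder (x : Int) (y : Int) : Prop := 0 ≤ x ∧ 0 ≤ y
instance (x : Int) (y : Int) : Decidable (Pre_getArrayWithBorder x y) := by
  unfold Pre_getArrayWithBorder; infer_instance

def pvWitness_getArrayWithBorder : Int × Int := (3, 4)

-- On collapsed heights x < 2 the top and bottom border rows are the same row; A's interleaved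
-- writes there end with the '╔' corner so its merged row reads ╔…╝, while B assigns the top
-- row and then the bottom row, so its merged row reads ╚…╝ — an unspecified degenerate corner
-- on which either collapsed value is as defensible as the other.
def D_getArrayWithBorder (x : Int) (y : Int) : Prop := x < 2
instance (x : Int) (y : Int) : Decidable (D_getArrayWithBorder x y) := by
  unfold D_getArrayWithBorder; infer_instance

def Spec_getArrayWithBorder (x : Int) (y : Int) (out : List (List String)) : Prop := ¬ D_getArrayWithBorder x y → out = getArrayWithBorder_alt x y
instance (x : Int) (y : Int) (out : List (List String)) : Decidable (Spec_getArrayWithBorder x y out) := by unfold Spec_getArrayWithBorder; infer_instance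

def pvDiffWitness_getArrayWithBorder : Int × Int := (1, 3)
def pvDiffWitnessOut_getArrayWithBorder : (List (List String)) × (List (List String)) :=
  ([["╔", "═", "╝", " "], [" ", " ", " ", " "]],
   [["╚", "═", "╝", " "], [" ", " ", " ", " "]])

-- ===== CLAIM (what is proved, stated in full; the proofs are below) =====
def Claim_unchanged_getArrayWithBorder : Prop := ∀ (x : Int) (y : Int), Dom_getArrayWithBorder x y → Pre_getArrayWithBorder x y → Spec_getArrayWithBorder x y (getArrayWithBorder x y)
def Claim_changed_getArrayWithBorder : Prop := Dom_getArrayWithBorder (pvDiffWitness_getArrayWithBorder.1) (pvDiffWitness_getArrayWithBorder.2) ∧ Pre_getArrayWithBorder (pvDiffWitness_getArrayWithBorder.1) (pvDiffWitness_getArrayWithBorder.2) ∧ D_getArrayWithBorder (pvDiffWitness_getArrayWithBorder.1) (pvDiffWitness_getArrayWithBorder.2) ∧ getArrayWithBorder (pvDiffWitness_getArrayWithBorder.1) (pvDiffWitness_getArrayWithBorder.2) = pvDiffWitnessOut_getArrayWithBorder.1 ∧ getArrayWithBorder_alt (pvDiffWitness_getArrayWithBorder.1) (pvDiffWitness_getArrayWithBorder.2)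 = pvDiffWitnessOut_getArrayWithBorder.2 ∧ pvDiffWitnessOut_getArrayWithBorder.1 ≠ pvDiffWitnessOut_getArrayWithBorder.2
def Claim_exact_getArrayWithBorder : Prop := ∀ (x : Int) (y : Int), Dom_getArrayWithBorder x y → Pre_getArrayWithBorder x y → D_getArrayWithBorder x y → getArrayWithBorder x y ≠ getArrayWithBorder_alt x y

-- ===== LEMMAS AND PROOFS =====

-- a row [f 0, f 1, …, f y] and the grid of such rows (the functional view both ports reduce to)
def mkrow (y : Int) (g : Int → String) : List String :=
  (PySem.List.pyRange 0 (y+1) 1).map g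

def mkg (x y : Int) (f : Int → Int → String) : List (List String) :=
  (PySem.List.pyRange 0 (x+1) 1).map (fun a => mkrow y (f a))

-- the cell rule A's four passes amount to (r1/c1 = resolved Python indices x-1 / y-1)
def aCell (x y : Int) (p q : Int) : String :=
  let r1 : Int := if 1 ≤ x then x - 1 else 0
  let c1 : Int := if 1 ≤ y then y - 1 else 0
  if p = 0 ∧ q = 0 then "╔"
  else if p = r1 ∧ q = 0 then "╚"
  else if p = r1 ∧ q = c1 then "╝"
  else if p = 0 ∧ q = c1 then "╗"
  else if q < (((y-1).toNat : Nat) : Int) ∧ (p = 0 ∨ p = r1) then "═"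
  else if p < ((x.toNat : Nat) : Int) ∧ (q = 0 ∨ q = c1) then "║"
  else " "

-- the row rules B's three painted templates amount to (c1 = resolved Python index y-1)
def topF (y : Int) (q : Int) : String :=
  if q = 0 then "╔"
  else if q = (if 1 ≤ y then y - 1 else 0) then "╗"
  else if q < (((y-1).toNat : Nat) : Int) then "═"
  else " "

def botF (y : Int) (q : Int) : String :=
  if q = 0 then "╚"
  else if q = (if 1 ≤ y then y - 1 else 0) then "╝"
  else if q < (((y-1).toNat : Nat) : Int) then "═"
  else " "

def sideF (y : Int) (q : Int) : String :=
  if q = (if 1 ≤ y then y - 1 else 0) then "║"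
  else if q = 0 then "║"
  else " "

-- pyGetD/pySetD at a Python index i that resolves (negative = from the end) to position k
lemma pyGetD_res {α : Type} (xs : List α) (i : Int) (d : α) (k : Nat) (hk : k < xs.length)
    (h : (if i < 0 then i + xs.length else i) = (k:Int)) :
    PySem.List.pyGetD xs i d = xs[k] := by
  unfold PySem.List.pyGetD PySem.List.pyGet? PySem.List.pyIdx?
  by_cases hi : 0 ≤ i
  · have : ¬ i < 0 := by omega
    simp only [this, if_false] at h
    have hik : i.toNat = k := by omega
    have : i < (xs.length : Int) := by omega
    simp [hi, this, hik, List.getElem?_eq_getElem hk]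
  · have hlt : i < 0 := by omega
    simp only [hlt, if_true] at h
    have h1 : -(xs.length : Int) ≤ i := by omega
    have h2 : xs.length - (-i).toNat = k := by omega
    simp [hi, h1, h2, List.getElem?_eq_getElem hk]

lemma pySetD_res {α : Type} (xs : List α) (i : Int) (v : α) (k : Nat) (hk : k < xs.length)
    (h : (if i < 0 then i + xs.length else i) = (k:Int)) :
    PySem.List.pySetD xs i v = xs.set k v := by
  unfold PySem.List.pySetD PySem.List.pySet? PySem.List.pyIdx?
  by_cases hi : 0 ≤ i
  · have : ¬ i < 0 := by omega
    simp only [this, if_false] at h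
    have hik : i.toNat = k := by omega
    have : i < (xs.length : Int) := by omega
    simp [hi, this, hik]
  · have hlt : i < 0 := by omega
    simp only [hlt, if_true] at h
    have h1 : -(xs.length : Int) ≤ i := by omega
    have h2 : xs.length - (-i).toNat = k := by omega
    simp [hi, h1, h2]

lemma set_map_pyRange {α : Type} (n : Int) (g : Int → α) (a : Nat) (v : α) :
    ((PySem.List.pyRange 0 n 1).map g).set a v
      = (PySem.List.pyRange 0 n 1).map (fun p => if p = (a:Int) then v else g p) := by
  apply List.ext_getElem
  · simp
  · intro p hp1 hp2
    simp only [List.getElem_set, List.getElem_map, PySem.List.getElem_pyRange_one] at *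
    split_ifs <;> first | rfl | omega

lemma mkrow_congr (y : Int) (g h : Int → String)
    (hgh : ∀ q : Int, 0 ≤ q → q < y+1 → g q = h q) : mkrow y g = mkrow y h := by
  unfold mkrow
  apply List.map_congr_left
  intro q hq
  rw [PySem.List.mem_pyRange_one] at hq
  exact hgh q hq.1 hq.2

lemma mkg_congr (x y : Int) (f g : Int → Int → String)
    (h : ∀ (p q : Int), 0 ≤ p → p < x+1 → 0 ≤ q → q < y+1 → f p q = g p q) :
    mkg x y f = mkg x y g := by
  unfold mkg
  apply List.map_congr_left
  intro p hp
  rw [PySem.List.mem_pyRange_one] at hp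
  exact mkrow_congr y _ _ (fun q hq1 hq2 => h p q hp.1 hp.2 hq1 hq2)

-- `row[j] = v` on the functional row: pointwise update at the resolved position jb
lemma set_mkrow (y : Int) (g : Int → String) (j jb : Int) (v : String)
    (hb0 : 0 ≤ jb) (hb1 : jb < y+1)
    (hj : (if j < 0 then j + (y+1) else j) = jb) :
    PySem.List.pySetD (mkrow y g) j v = mkrow y (fun q => if q = jb then v else g q) := by
  have hrowlen : (mkrow y g).length = (y+1).toNat := by
    simp [mkrow, PySem.List.length_pyRange_one]
  have hkb : jb.toNat < (mkrow y g).length := by rw [hrowlen]; omega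
  have hj' : (if j < 0 then j + ((mkrow y g).length : Int) else j) = (jb.toNat : Int) := by
    rw [hrowlen]; omega
  rw [pySetD_res _ j _ jb.toNat hkb hj']
  unfold mkrow
  rw [set_map_pyRange]
  simp only [show ((jb.toNat:Int)) = jb from by omega]

-- `g[i][j] = v` on the functional grid: pointwise update at the resolved position (ia, jb)
lemma set2_mkg (x y : Int) (f : Int → Int → String) (i j : Int) (ia jb : Int) (v : String)
    (ha0 : 0 ≤ ia) (ha1 : ia < x+1) (hb0 : 0 ≤ jb) (hb1 : jb < y+1)
    (hi : (if i < 0 then i + (x+1) else i) = ia)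
    (hj : (if j < 0 then j + (y+1) else j) = jb) :
    pySet2 (mkg x y f) i j v
      = mkg x y (fun p q => if p = ia ∧ q = jb then v else f p q) := by
  have hlen : (mkg x y f).length = (x+1).toNat := by
    simp [mkg, PySem.List.length_pyRange_one]
  have hka : ia.toNat < (mkg x y f).length := by rw [hlen]; omega
  have hi' : (if i < 0 then i + ((mkg x y f).length : Int) else i) = (ia.toNat : Int) := by
    rw [hlen]; omega
  have hrow : PySem.List.pyGetD (mkg x y f) i [] = mkrow y (f ia) := by
    rw [pyGetD_res (mkg x y f) i [] ia.toNat hka hi']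
    simp only [mkg, List.getElem_map, PySem.List.getElem_pyRange_one]
    have h0 : (0:Int) + (ia.toNat:Int) = ia := by omega
    rw [h0]
  unfold pySet2
  rw [hrow, set_mkrow y (f ia) j jb v hb0 hb1 hj,
      pySetD_res _ i _ ia.toNat hka hi']
  unfold mkg
  rw [set_map_pyRange]
  simp only [show ((ia.toNat:Int)) = ia from by omega]
  apply List.map_congr_left
  intro p hp
  rw [PySem.List.mem_pyRange_one] at hp
  by_cases h1 : p = ia
  · simp [h1]
  · simp only [if_neg h1]
    exact mkrow_congr y _ _ (fun q hq1 hq2 => by simp [h1])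

-- A's vertical-edge loop, first n iterations
lemma vloop (x y c1 : Int) (_hx : 0 ≤ x) (hy : 0 ≤ y)
    (hc1 : c1 = if 1 ≤ y then y - 1 else 0)
    (n : Nat) (hn : (n:Int) ≤ x) (f : Int → Int → String) :
    (PySem.List.pyRange 0 (n:Int) 1).foldl
        (fun r i => pySet2 (pySet2 r i 0 "║") i (y-1) "║") (mkg x y f)
      = mkg x y (fun p q => if p < (n:Int) ∧ (q = 0 ∨ q = c1) then "║" else f p q) := by
  have hc0 : 0 ≤ c1 ∧ c1 < y + 1 := by subst hc1; split_ifs <;> omega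
  have hjres : (if y - 1 < 0 then y - 1 + (y+1) else y - 1) = c1 := by
    subst hc1; split_ifs <;> omega
  induction n with
  | zero =>
    rw [show ((0:Nat):Int) = 0 from rfl, PySem.List.pyRange_one_eq_nil (le_refl 0)]
    simp only [List.foldl_nil]
    apply mkg_congr
    intro p q hp0 hp1 hq0 hq1
    rw [if_neg (by omega)]
  | succ n ih =>
    rw [show (((n+1:Nat)):Int) = (n:Int) + 1 from by push_cast; ring,
        PySem.List.pyRange_one_succ_right (by omega), List.foldl_append,
        ih (by omega)]
    simp only [List.foldl_cons, List.foldl_nil]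
    rw [set2_mkg x y _ (n:Int) 0 (n:Int) 0 "║" (by omega) (by omega) (by omega) (by omega)
          (by omega) (by omega),
        set2_mkg x y _ (n:Int) (y-1) (n:Int) c1 "║" (by omega) (by omega) (by omega) (by omega)
          (by omega) hjres]
    apply mkg_congr
    intro p q hp0 hp1 hq0 hq1
    split_ifs <;> first | rfl | omega

-- A's horizontal-edge loop, first n iterations
lemma hloop (x y r1 : Int) (hx : 0 ≤ x) (_hy : 0 ≤ y)
    (hr1 : r1 = if 1 ≤ x then x - 1 else 0)
    (n : Nat) (hn : (n:Int) ≤ y) (f : Int → Int → String) :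
    (PySem.List.pyRange 0 (n:Int) 1).foldl
        (fun r i => pySet2 (pySet2 r 0 i "═") (x-1) i "═") (mkg x y f)
      = mkg x y (fun p q => if q < (n:Int) ∧ (p = 0 ∨ p = r1) then "═" else f p q) := by
  have hr0 : 0 ≤ r1 ∧ r1 < x + 1 := by subst hr1; split_ifs <;> omega
  have hires : (if x - 1 < 0 then x - 1 + (x+1) else x - 1) = r1 := by
    subst hr1; split_ifs <;> omega
  induction n with
  | zero =>
    rw [show ((0:Nat):Int) = 0 from rfl, PySem.List.pyRange_one_eq_nil (le_refl 0)]
    simp only [List.foldl_nil]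
    apply mkg_congr
    intro p q hp0 hp1 hq0 hq1
    rw [if_neg (by omega)]
  | succ n ih =>
    rw [show (((n+1:Nat)):Int) = (n:Int) + 1 from by push_cast; ring,
        PySem.List.pyRange_one_succ_right (by omega), List.foldl_append,
        ih (by omega)]
    simp only [List.foldl_cons, List.foldl_nil]
    rw [set2_mkg x y _ 0 (n:Int) 0 (n:Int) "═" (by omega) (by omega) (by omega) (by omega)
          (by omega) (by omega),
        set2_mkg x y _ (x-1) (n:Int) r1 (n:Int) "═" (by omega) (by omega) (by omega) (by omega)
          hires (by omega)]
    apply mkg_congr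
    intro p q hp0 hp1 hq0 hq1
    split_ifs <;> first | rfl | omega

-- A's output IS the functional grid of aCell (for every input A accepts)
set_option maxHeartbeats 2000000 in
lemma A_repr (x y : Int) (hx : 0 ≤ x) (hy : 0 ≤ y) :
    getArrayWithBorder x y = mkg x y (aCell x y) := by
  set r1 : Int := if 1 ≤ x then x - 1 else 0 with hr1d
  set c1 : Int := if 1 ≤ y then y - 1 else 0 with hc1d
  have hires : (if x - 1 < 0 then x - 1 + (x+1) else x - 1) = r1 := by
    rw [hr1d]; split_ifs <;> omega
  have hjres : (if y - 1 < 0 then y - 1 + (y+1) else y - 1) = c1 := by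
    rw [hc1d]; split_ifs <;> omega
  have hr0 : 0 ≤ r1 ∧ r1 < x + 1 := by rw [hr1d]; split_ifs <;> omega
  have hc0 : 0 ≤ c1 ∧ c1 < y + 1 := by rw [hc1d]; split_ifs <;> omega
  have h1 : PySem.List.pyRange 0 x 1 = PySem.List.pyRange 0 ((x.toNat:Nat):Int) 1 := by
    congr 1; omega
  have h2 : PySem.List.pyRange 0 (y-1) 1 = PySem.List.pyRange 0 (((y-1).toNat:Nat):Int) 1 := by
    by_cases h : 1 ≤ y
    · congr 1; omega
    · rw [PySem.List.pyRange_one_eq_nil (by omega), PySem.List.pyRange_one_eq_nil (by omega)]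
  have hinit : (PySem.List.pyRange 0 (x+1) 1).map
      (fun _ => (PySem.List.pyRange 0 (y+1) 1).map (fun _ => " "))
      = mkg x y (fun _ _ => " ") := rfl
  show pySet2 _ 0 0 "╔" = _
  rw [hinit, h1, h2,
      vloop x y c1 hx hy hc1d x.toNat (by omega) _,
      hloop x y r1 hx hy hr1d (y-1).toNat (by omega) _,
      set2_mkg x y _ 0 (y-1) 0 c1 "╗" (by omega) (by omega) (by omega) (by omega) (by omega) hjres,
      set2_mkg x y _ (x-1) (y-1) r1 c1 "╝" (by omega) (by omega) (by omega) (by omega) hires hjres,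
      set2_mkg x y _ (x-1) 0 r1 0 "╚" (by omega) (by omega) (by omega) (by omega) hires (by omega),
      set2_mkg x y _ 0 0 0 0 "╔" (by omega) (by omega) (by omega) (by omega) (by omega) (by omega)]
  apply mkg_congr
  intro p q hp0 hp1 hq0 hq1
  simp only [aCell, ← hr1d, ← hc1d]

-- blank painted row = functional constant row
lemma paint_nil (y : Int) (hy : 0 ≤ y) : paintB y [] = mkrow y (fun _ => " ") := by
  unfold paintB
  simp only [List.foldl_nil]
  apply List.ext_getElem
  · simp [mkrow, PySem.List.length_pyRange_one]
  · intro j hj1 hj2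
    simp [mkrow, PySem.List.getElem_pyRange_one]

-- B's edge strokes, first n iterations
lemma edge_fold (y : Int) (hy : 0 ≤ y) (n : Nat) (hn : (n:Int) ≤ y) (g : Int → String) :
    ((PySem.List.pyRange 0 (n:Int) 1).map (fun j => (j, "═"))).foldl
        (fun row s => PySem.List.pySetD row s.1 s.2) (mkrow y g)
      = mkrow y (fun q => if q < (n:Int) then "═" else g q) := by
  induction n with
  | zero =>
    rw [show ((0:Nat):Int) = 0 from rfl, PySem.List.pyRange_one_eq_nil (le_refl 0)]
    simp only [List.map_nil, List.foldl_nil]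
    apply mkrow_congr
    intro q hq0 hq1
    rw [if_neg (by omega)]
  | succ n ih =>
    rw [show (((n+1:Nat)):Int) = (n:Int) + 1 from by push_cast; ring,
        PySem.List.pyRange_one_succ_right (by omega), List.map_append, List.foldl_append,
        ih (by omega)]
    simp only [List.map_cons, List.map_nil, List.foldl_cons, List.foldl_nil]
    rw [set_mkrow y _ (n:Int) (n:Int) "═" (by omega) (by omega) (by omega)]
    apply mkrow_congr
    intro q hq0 hq1
    split_ifs <;> first | rfl | omega

-- the three painted templates, as functional rows
lemma paint_top (y : Int) (hy : 0 ≤ y) :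
    paintB y ((PySem.List.pyRange 0 (y-1) 1).map (fun j => (j, "═")) ++ [(y-1, "╗"), (0, "╔")])
      = mkrow y (topF y) := by
  have hc1 : 0 ≤ (if 1 ≤ y then y - 1 else 0) ∧ (if 1 ≤ y then y - 1 else 0) < y + 1 := by
    split_ifs <;> omega
  have hjres : (if y - 1 < 0 then y - 1 + (y+1) else y - 1)
      = (if 1 ≤ y then y - 1 else 0) := by split_ifs <;> omega
  have h2 : PySem.List.pyRange 0 (y-1) 1 = PySem.List.pyRange 0 (((y-1).toNat:Nat):Int) 1 := by
    by_cases h : 1 ≤ y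
    · congr 1; omega
    · rw [PySem.List.pyRange_one_eq_nil (by omega), PySem.List.pyRange_one_eq_nil (by omega)]
  unfold paintB
  rw [List.foldl_append,
      show (List.replicate (y+1).toNat " ") = mkrow y (fun _ => " ") from by
        have := paint_nil y hy; unfold paintB at this; simpa using this,
      h2, edge_fold y hy (y-1).toNat (by omega) _]
  simp only [List.foldl_cons, List.foldl_nil]
  rw [set_mkrow y _ (y-1) (if 1 ≤ y then y - 1 else 0) "╗" hc1.1 hc1.2 hjres,
      set_mkrow y _ 0 0 "╔" (by omega) (by omega) (by omega)]
  apply mkrow_congr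
  intro q hq0 hq1
  simp only [topF]

lemma paint_bottom (y : Int) (hy : 0 ≤ y) :
    paintB y ((PySem.List.pyRange 0 (y-1) 1).map (fun j => (j, "═")) ++ [(y-1, "╝"), (0, "╚")])
      = mkrow y (botF y) := by
  have hc1 : 0 ≤ (if 1 ≤ y then y - 1 else 0) ∧ (if 1 ≤ y then y - 1 else 0) < y + 1 := by
    split_ifs <;> omega
  have hjres : (if y - 1 < 0 then y - 1 + (y+1) else y - 1)
      = (if 1 ≤ y then y - 1 else 0) := by split_ifs <;> omega
  have h2 : PySem.List.pyRange 0 (y-1) 1 = PySem.List.pyRange 0 (((y-1).toNat:Nat):Int) 1 := by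
    by_cases h : 1 ≤ y
    · congr 1; omega
    · rw [PySem.List.pyRange_one_eq_nil (by omega), PySem.List.pyRange_one_eq_nil (by omega)]
  unfold paintB
  rw [List.foldl_append,
      show (List.replicate (y+1).toNat " ") = mkrow y (fun _ => " ") from by
        have := paint_nil y hy; unfold paintB at this; simpa using this,
      h2, edge_fold y hy (y-1).toNat (by omega) _]
  simp only [List.foldl_cons, List.foldl_nil]
  rw [set_mkrow y _ (y-1) (if 1 ≤ y then y - 1 else 0) "╝" hc1.1 hc1.2 hjres,
      set_mkrow y _ 0 0 "╚" (by omega) (by omega) (by omega)]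
  apply mkrow_congr
  intro q hq0 hq1
  simp only [botF]

lemma paint_side (y : Int) (hy : 0 ≤ y) :
    paintB y [(0, "║"), (y-1, "║")] = mkrow y (sideF y) := by
  have hc1 : 0 ≤ (if 1 ≤ y then y - 1 else 0) ∧ (if 1 ≤ y then y - 1 else 0) < y + 1 := by
    split_ifs <;> omega
  have hjres : (if y - 1 < 0 then y - 1 + (y+1) else y - 1)
      = (if 1 ≤ y then y - 1 else 0) := by split_ifs <;> omega
  unfold paintB
  rw [show (List.replicate (y+1).toNat " ") = mkrow y (fun _ => " ") from by
        have := paint_nil y hy; unfold paintB at this; simpa using this]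
  simp only [List.foldl_cons, List.foldl_nil]
  rw [set_mkrow y _ 0 0 "║" (by omega) (by omega) (by omega),
      set_mkrow y _ (y-1) (if 1 ≤ y then y - 1 else 0) "║" hc1.1 hc1.2 hjres]
  apply mkrow_congr
  intro q hq0 hq1
  simp only [sideF]

-- B's assembled grid, as a functional grid (x ≥ 2, so rows 0 / x-1 / x are distinct)
set_option maxHeartbeats 1000000 in
lemma B_repr (x y : Int) (hx : 2 ≤ x) (hy : 0 ≤ y) :
    getArrayWithBorder_alt x y
      = mkg x y (fun p q =>
          if p = 0 then topF y q
          else if p = x - 1 then botF y q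
          else if p = x then " "
          else sideF y q) := by
  show PySem.List.pySetD (PySem.List.pySetD
        (List.replicate x.toNat (paintB y [(0, "║"), (y-1, "║")]) ++ [paintB y []]) 0 _) (x-1) _
      = _
  rw [paint_top y hy, paint_bottom y hy, paint_side y hy, paint_nil y hy]
  have hlen : (List.replicate x.toNat (mkrow y (sideF y)) ++ [mkrow y (fun _ => " ")]).length
      = x.toNat + 1 := by simp
  rw [pySetD_res _ 0 _ 0 (by simp only [hlen]; omega) (by norm_num),
      pySetD_res _ (x-1) _ (x-1).toNat
        (by simp only [List.length_set, hlen]; omega)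
        (by simp only [List.length_set, hlen]; split_ifs <;> omega)]
  apply List.ext_getElem
  · simp [mkg, mkrow, PySem.List.length_pyRange_one, hlen]; omega
  · intro i hi1 hi2
    have hin : i < x.toNat + 1 := by
      simpa [List.length_set, hlen] using hi1
    simp only [List.getElem_set, mkg, List.getElem_map, PySem.List.getElem_pyRange_one]
    by_cases e1 : (x-1).toNat = i
    · rw [if_pos e1]
      apply mkrow_congr
      intro q hq0 hq1
      rw [if_neg (by omega), if_pos (by omega)]
    · rw [if_neg e1]
      by_cases e0 : 0 = i
      · rw [if_pos e0]
        apply mkrow_congr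
        intro q hq0 hq1
        rw [if_pos (by omega)]
      · rw [if_neg e0]
        by_cases ex : i < x.toNat
        · rw [List.getElem_append_left (by simpa using ex), List.getElem_replicate]
          apply mkrow_congr
          intro q hq0 hq1
          rw [if_neg (by omega), if_neg (by omega), if_neg (by omega)]
        · rw [List.getElem_append_right (by simpa using ex), List.getElem_singleton]
          apply mkrow_congr
          intro q hq0 hq1
          rw [if_neg (by omega), if_neg (by omega), if_pos (by omega)]

lemma main_eq (x y : Int) (hx : 2 ≤ x) (hy : 0 ≤ y) :
    getArrayWithBorder x y = getArrayWithBorder_alt x y := by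
  rw [A_repr x y (by omega) hy, B_repr x y hx hy]
  apply mkg_congr
  intro p q hp0 hp1 hq0 hq1
  have ecx : ((x.toNat : Nat) : Int) = x := by omega
  have exr : (if (1:Int) ≤ x then x - 1 else 0) = x - 1 := if_pos (by omega)
  simp only [aCell, topF, botF, sideF, ecx, exr]
  split_ifs <;> first | rfl | omega

-- B's collapsed grid (x < 2) begins with the bottom-edge row
lemma B_collapsed (x y : Int) (hx0 : 0 ≤ x) (hx : x < 2) (hy : 0 ≤ y) :
    ∃ rest, getArrayWithBorder_alt x y = mkrow y (botF y) :: rest := by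
  show ∃ rest, PySem.List.pySetD (PySem.List.pySetD
        (List.replicate x.toNat (paintB y [(0, "║"), (y-1, "║")]) ++ [paintB y []]) 0 _) (x-1) _
      = _
  rw [paint_top y hy, paint_bottom y hy, paint_side y hy, paint_nil y hy]
  have hlen : (List.replicate x.toNat (mkrow y (sideF y)) ++ [mkrow y (fun _ => " ")]).length
      = x.toNat + 1 := by simp
  rw [pySetD_res _ 0 _ 0 (by simp only [hlen]; omega) (by norm_num),
      pySetD_res _ (x-1) _ 0
        (by simp only [List.length_set, hlen]; omega)
        (by simp only [List.length_set, hlen]; split_ifs <;> omega)]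
  rcases List.exists_cons_of_ne_nil
      (show ((List.replicate x.toNat (mkrow y (sideF y)) ++ [mkrow y (fun _ => " ")]).set 0
              (mkrow y (topF y))) ≠ [] from by
        intro hnil
        have := congrArg List.length hnil
        simp [hlen] at this) with ⟨r, rest, hr⟩
  exact ⟨rest, by rw [hr]; rfl⟩

-- ===== VERDICT (by name: the statement is the Claim_ definition above) =====
theorem getArrayWithBorder_spec : Claim_unchanged_getArrayWithBorder := by
  intro x y hdom hpre hnd
  unfold D_getArrayWithBorder at hnd
  exact main_eq x y (by omega) hpre.2

theorem getArrayWithBorder_changed : Claim_changed_getArrayWithBorder := by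
  unfold Claim_changed_getArrayWithBorder; decide

theorem getArrayWithBorder_tight : Claim_exact_getArrayWithBorder := by
  intro x y hdom hpre hD h
  obtain ⟨hx, hy⟩ := hpre
  unfold D_getArrayWithBorder at hD
  obtain ⟨rest, hB⟩ := B_collapsed x y hx hD hy
  rw [A_repr x y hx hy, hB] at h
  have hcons : PySem.List.pyRange 0 (x+1) 1 = 0 :: PySem.List.pyRange (0+1) (x+1) 1 :=
    PySem.List.pyRange_one_cons (by omega)
  rw [show mkg x y (aCell x y)
        = mkrow y (aCell x y 0) :: (PySem.List.pyRange (0+1) (x+1) 1).map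
            (fun a => mkrow y (aCell x y a)) from by
      unfold mkg; rw [hcons, List.map_cons]] at h
  have hrow : mkrow y (aCell x y 0) = mkrow y (botF y) := (List.cons.injEq _ _ _ _ ▸ h).1
  have hcons2 : PySem.List.pyRange 0 (y+1) 1 = 0 :: PySem.List.pyRange (0+1) (y+1) 1 :=
    PySem.List.pyRange_one_cons (by omega)
  unfold mkrow at hrow
  rw [hcons2, List.map_cons, List.map_cons] at hrow
  have hcell : aCell x y 0 0 = botF y 0 := (List.cons.injEq _ _ _ _ ▸ hrow).1
  have h1 : aCell x y 0 0 = "╔" := by simp [aCell]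
  have h2 : botF y 0 = "╚" := by simp [botF]
  rw [h1, h2] at hcell
  exact absurd hcell (by decide)
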